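-- pv_equiv track=rewrite | github.com/LeeJoEun-01/coding-test | 프로그래머스/1/258712. 가장 많이 받은 선물/가장 많이 받은 선물.py | solution
-- ===== SOURCE A (Python) =====
-- def solution(friends, gifts):
--     answer = 0
--     dic_f = {}
--     N = len(friends)
--
--     i = 0
--     for name in friends:
--         dic_f[name] = i
--         i += 1
--
--     results = [[0 for _ in range(N)] for _ in range(N)]
--     for line in gifts:
--         a, b = line.split(" ")
--         results[dic_f[a]][dic_f[b]] += 1
--
--     # 선물지수
--     gifts = [0]*N
--     for i in range(N):
--         give, get = 0, 0
--         for j in range(N):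
--             give += results[i][j]
--
--         for j in range(N):
--             get += results[j][i]
--
--         gifts[i] = give-get
--
--     result = [0]*N
--     for i in range(N-1):
--         for j in range(i+1,N):
--             if results[i][j] > results[j][i]:
--                 result[i] += 1
--             elif results[i][j] < results[j][i]:
--                 result[j] += 1
--             else:
--                 if gifts[i] > gifts[j]:
--                     result[i] += 1
--                 elif gifts[i] < gifts[j]:
--                     result[j] += 1
--
--     answer = max(result)
--
--     return answer
-- ===== SOURCE B (Python) =====
-- def solution(friends, gifts):
--     idx = {}
--     for i, name in enumerate(friends):
--         idx[name] = i
--     n = len(friends)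
--     counts = {}
--     give = [0] * n
--     get = [0] * n
--     pairs = {}
--     for line in gifts:
--         a, b = line.split(" ")
--         ia, ib = idx[a], idx[b]
--         counts[(ia, ib)] = counts.get((ia, ib), 0) + 1
--         give[ia] += 1
--         get[ib] += 1
--         if ia != ib:
--             pairs[(min(ia, ib), max(ia, ib))] = True
--     score = [give[i] - get[i] for i in range(n)]
--
--     # Baseline: if i and j exchanged no gifts (or equally many each way), i beats j
--     # exactly when score[i] > score[j]; so start from the score ranking, computed by
--     # sorting: wins[i] = number of friends with a strictly smaller gift index.
--     order = sorted(score)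
--     first = {}
--     for pos, s in enumerate(order):
--         if s not in first:
--             first[s] = pos
--     wins = [first[score[i]] for i in range(n)]
--
--     # Sparse correction: only pairs that actually exchanged gifts unevenly can
--     # deviate from the score ranking; fix exactly those.
--     for (i, j) in pairs:
--         cij = counts.get((i, j), 0)
--         cji = counts.get((j, i), 0)
--         if cij != cji:
--             if score[i] > score[j]:
--                 wins[i] -= 1
--             elif score[j] > score[i]:
--                 wins[j] -= 1
--             if cij > cji:
--                 wins[i] += 1
--             else:
--                 wins[j] += 1
--     return max(wins)
-- ===== Notes on version B (the rewrite author's own statement) =====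
-- stated objective: alternative
-- what changed: Replaces A's NxN matrix, its row/column summations and the all-pairs triangular comparison loop by a single O(G) pass tallying per-pair counts, give/get totals and the set of pairs that exchanged gifts, then ranks everyone by gift index with one sort (which already decides every pair with balanced or no direct exchange) and corrects only the stored uneven pairs.
import Mathlib
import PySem

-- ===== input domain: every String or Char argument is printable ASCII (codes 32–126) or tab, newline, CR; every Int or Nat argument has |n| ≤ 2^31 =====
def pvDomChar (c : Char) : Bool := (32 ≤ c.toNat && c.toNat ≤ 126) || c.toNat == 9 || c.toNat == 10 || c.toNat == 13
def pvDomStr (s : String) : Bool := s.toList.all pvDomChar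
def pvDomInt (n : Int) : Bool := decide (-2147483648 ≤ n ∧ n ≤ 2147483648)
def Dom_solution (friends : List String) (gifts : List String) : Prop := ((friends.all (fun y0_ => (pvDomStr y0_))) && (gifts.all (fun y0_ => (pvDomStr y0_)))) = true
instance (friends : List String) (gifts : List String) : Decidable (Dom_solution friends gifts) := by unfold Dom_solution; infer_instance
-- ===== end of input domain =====

-- B drops A's N×N matrix and its all-pairs triangular comparison loop: it tallies
-- per-pair gift counts and give/get totals in one pass over the gift lines, ranks
-- everybody by gift index via one sort (the score decides every pair that exchanged
-- no or equally many gifts), and then corrects only the pairs that actually exchanged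
-- gifts unevenly (objective: alternative algorithm, O(N log N + G) core instead of O(N²)).

-- ===== PORT A =====
-- Transliteration of A, phase by phase.  dic_f values are the running index i ≥ 0,
-- so `.toNat` on them is exact.  List indexing uses getD; every read/write index is
-- in range exactly as in the Python (out-of-range would raise there).

-- `for name in friends: dic_f[name] = i; i += 1`
def pvA_dict (friends : List String) : PySem.Dict String Int :=
  (friends.foldl (fun (st : PySem.Dict String Int × Int) name =>
      (st.1.insert name st.2, st.2 + 1)) (PySem.Dict.empty, 0)).1

-- `for line in gifts: a, b = line.split(" "); results[dic_f[a]][dic_f[b]] += 1`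
def pvA_matrix (N : Nat) (dicf : PySem.Dict String Int) (gifts : List String) : List (List Int) :=
  gifts.foldl (fun res line =>
      match PySem.Str.split? line " " with
      | some [a, b] =>
        match dicf.get? a, dicf.get? b with
        | some ia, some ib => res.modify ia.toNat (fun row => row.modify ib.toNat (· + 1))
        | _, _ => res      -- Python raises KeyError here: outside Pre_
      | _ => res           -- Python raises ValueError (unpack) here: outside Pre_
    ) (List.replicate N (List.replicate N (0 : Int)))

-- the 선물지수 loop: gifts[i] = (row-sum) - (column-sum)
def pvA_giftIdx (N : Nat) (results : List (List Int)) : List Int :=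
  (List.range N).map (fun i =>
      let give := (List.range N).foldl (fun acc j => acc + ((results.getD i []).getD j 0)) 0
      let get  := (List.range N).foldl (fun acc j => acc + ((results.getD j []).getD i 0)) 0
      give - get)

-- the triangular `for i in range(N-1): for j in range(i+1, N)` loop over `result`
def pvA_result (N : Nat) (results : List (List Int)) (giftIdx : List Int) : List Int :=
  (List.range (N - 1)).foldl (fun res i =>
      (List.range' (i + 1) (N - 1 - i)).foldl (fun res j =>
        if (results.getD j []).getD i 0 < (results.getD i []).getD j 0 then res.modify i (· + 1)
        else if (results.getD i []).getD j 0 < (results.getD j []).getD i 0 then res.modify j (· + 1)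
        else if giftIdx.getD j 0 < giftIdx.getD i 0 then res.modify i (· + 1)
        else if giftIdx.getD i 0 < giftIdx.getD j 0 then res.modify j (· + 1)
        else res) res) (List.replicate N (0 : Int))

def solution (friends : List String) (gifts : List String) : Int :=
  let N := friends.length
  let dicf := pvA_dict friends
  let results := pvA_matrix N dicf gifts
  let giftIdx := pvA_giftIdx N results
  let result := pvA_result N results giftIdx
  match PySem.List.max? result (fun x => x) with
  | some v => v
  | none => 0            -- Python: max([]) raises ValueError (friends = []): outside Pre_

-- ===== PORT B =====
-- Transliteration of Source B, phase by phase.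

-- `for i, name in enumerate(friends): idx[name] = i`
def pvB_idx (friends : List String) : PySem.Dict String Int :=
  (PySem.List.enumerate friends).foldl
      (fun (d : PySem.Dict String Int) p => d.insert p.2 p.1) PySem.Dict.empty

-- the single pass over gifts maintaining (counts, give, get, pairs)
def pvB_state (idx : PySem.Dict String Int) (n : Nat) (gifts : List String) :
    PySem.Dict (Int × Int) Int × List Int × List Int × PySem.Dict (Int × Int) Bool :=
  gifts.foldl (fun st line =>
      match PySem.Str.split? line " " with
      | some [a, b] =>
        match idx.get? a, idx.get? b with
        | some ia, some ib =>
            (st.1.insert (ia, ib) (st.1.getD (ia, ib) 0 + 1),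
             st.2.1.modify ia.toNat (· + 1),
             st.2.2.1.modify ib.toNat (· + 1),
             if ia ≠ ib then st.2.2.2.insert (min ia ib, max ia ib) true else st.2.2.2)
        | _, _ => st     -- Python raises KeyError here: outside Pre_
      | _ => st          -- Python raises ValueError (unpack) here: outside Pre_
    ) (PySem.Dict.empty, List.replicate n (0 : Int), List.replicate n (0 : Int), PySem.Dict.empty)

-- `score = [give[i] - get[i] for i in range(n)]`
def pvB_score (give get : List Int) (n : Nat) : List Int :=
  (List.range n).map (fun i => give.getD i 0 - get.getD i 0)

-- `for pos, s in enumerate(order): if s not in first: first[s] = pos`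
def pvB_first (order : List Int) : PySem.Dict Int Int :=
  (PySem.List.enumerate order).foldl
      (fun (d : PySem.Dict Int Int) p => if d.contains p.2 then d else d.insert p.2 p.1)
      PySem.Dict.empty

-- `wins = [first[score[i]] for i in range(n)]`
-- (score[i] is an element of order, so it is always a key of first: getD is exact)
def pvB_base (first : PySem.Dict Int Int) (score : List Int) (n : Nat) : List Int :=
  (List.range n).map (fun i => (first.get? (score.getD i 0)).getD 0)

-- `for (i, j) in pairs: ...` — the sparse correction loop
def pvB_correct (counts : PySem.Dict (Int × Int) Int) (score : List Int)
    (pairs : List (Int × Int)) (wins : List Int) : List Int :=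
  pairs.foldl (fun w p =>
    let cij := counts.getD (p.1, p.2) 0
    let cji := counts.getD (p.2, p.1) 0
    if cij ≠ cji then
      let w1 :=
        if score.getD p.2.toNat 0 < score.getD p.1.toNat 0 then w.modify p.1.toNat (· - 1)
        else if score.getD p.1.toNat 0 < score.getD p.2.toNat 0 then w.modify p.2.toNat (· - 1)
        else w
      if cji < cij then w1.modify p.1.toNat (· + 1) else w1.modify p.2.toNat (· + 1)
    else w) wins

def solution_alt (friends : List String) (gifts : List String) : Int :=
  let idx := pvB_idx friends
  let n := friends.length
  let st := pvB_state idx n gifts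
  let score := pvB_score st.2.1 st.2.2.1 n
  let order := PySem.List.sorted score (fun x => x) false
  let first := pvB_first order
  let wins := pvB_correct st.1 score st.2.2.2.keys (pvB_base first score n)
  match PySem.List.max? wins (fun x => x) with
  | some v => v
  | none => 0            -- Python: max([]) raises ValueError (friends = []): outside Pre_

-- ===== PRECONDITION & SPEC =====
-- Pre_ excludes exactly the inputs where A raises: friends = [] (max([]) → ValueError),
-- a gift line that does not split on " " into exactly two parts (ValueError), and a
-- gift line naming someone not in friends (KeyError).  B raises on the same inputs.
def Pre_solution (friends : List String) (gifts : List String) : Prop :=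
  friends ≠ [] ∧ ∀ line ∈ gifts,
    ((PySem.Str.split? line " ").getD []).length = 2 ∧
    ∀ x ∈ (PySem.Str.split? line " ").getD [], x ∈ friends
instance (friends : List String) (gifts : List String) : Decidable (Pre_solution friends gifts) := by
  unfold Pre_solution; infer_instance

def pvWitness_solution : List String × List String := (["alice", "bob"], ["alice bob", "alice bob", "bob alice"])

def Spec_solution (friends : List String) (gifts : List String) (out : Int) : Prop := out = solution_alt friends gifts
instance (friends : List String) (gifts : List String) (out : Int) : Decidable (Spec_solution friends gifts out) := by unfold Spec_solution; infer_instance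

-- ===== CLAIM (what is proved, stated in full; the proofs are below) =====
def Claim_equal_solution : Prop := ∀ (friends : List String) (gifts : List String), Dom_solution friends gifts → Pre_solution friends gifts → Spec_solution friends gifts (solution friends gifts)

-- ===== LEMMAS AND PROOFS =====

-- canonical objects both sides are reduced to
def pvPair (d : PySem.Dict String Int) (line : String) : Int × Int :=
  match (PySem.Str.split? line " ").getD [] with
  | [a, b] => (d.getD a 0, d.getD b 0)
  | _ => (0, 0)

def pvGP (friends gifts : List String) : List (Int × Int) :=
  gifts.map (pvPair (pvB_idx friends))

def pvCnt (gp : List (Int × Int)) (i j : Nat) : Int := (gp.count ((i : Int), (j : Int)) : Int)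

def pvS (gp : List (Int × Int)) (i : Nat) : Int :=
  (gp.countP (fun p => p.1 == (i : Int)) : Int) - (gp.countP (fun p => p.2 == (i : Int)) : Int)

def pvBt (gp : List (Int × Int)) (i j : Nat) : Bool :=
  decide (pvCnt gp j i < pvCnt gp i j) ||
    (decide (pvCnt gp i j = pvCnt gp j i) && decide (pvS gp j < pvS gp i))

-- A's dict-building loop is B's (generalized over the start state)
theorem pv_enumfold_eq (fr : List String) : ∀ (d : PySem.Dict String Int) (k : Int),
    (fr.foldl (fun (st : PySem.Dict String Int × Int) name =>
        (st.1.insert name st.2, st.2 + 1)) (d, k)).1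
      = (PySem.List.enumerate fr k).foldl (fun d p => d.insert p.2 p.1) d := by
  induction fr with
  | nil => intro d k; rfl
  | cons a t ih => intro d k; simp [PySem.List.enumerate_cons, List.foldl_cons, ih]

theorem pvA_dict_eq (friends : List String) : pvA_dict friends = pvB_idx friends := by
  unfold pvA_dict pvB_idx
  exact pv_enumfold_eq friends PySem.Dict.empty 0

theorem pv_foldins_bounds (fr : List String) : ∀ (d : PySem.Dict String Int) (k : Int),
    0 ≤ k → (∀ s v, d.get? s = some v → 0 ≤ v ∧ v < k) →
    ∀ s v, ((PySem.List.enumerate fr k).foldl (fun d p => d.insert p.2 p.1) d).get? s = some v →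
      0 ≤ v ∧ v < k + fr.length := by
  induction fr with
  | nil => intro d k hk h s v hv; simpa using h s v (by simpa [PySem.List.enumerate_nil] using hv)
  | cons a t ih =>
    intro d k hk h s v hv
    rw [PySem.List.enumerate_cons, List.foldl_cons] at hv
    have := ih (d.insert a k) (k + 1) (by omega) (fun s v hsv => by
      rw [PySem.Dict.get?_insert] at hsv
      split at hsv
      · cases hsv; omega
      · have := h s v hsv; omega) s v hv
    simp only [List.length_cons] at *
    omega

theorem pv_foldins_mem (fr : List String) : ∀ (d : PySem.Dict String Int) (k : Int) (s : String),
    ((d.get? s).isSome ∨ s ∈ fr) →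
    (((PySem.List.enumerate fr k).foldl (fun d p => d.insert p.2 p.1) d).get? s).isSome := by
  induction fr with
  | nil => intro d k s h; simpa [PySem.List.enumerate_nil] using h.resolve_right (by simp)
  | cons a t ih =>
    intro d k s h
    rw [PySem.List.enumerate_cons, List.foldl_cons]
    apply ih
    rcases h with h | h
    · left; rw [PySem.Dict.get?_insert]; split <;> simp_all
    · rcases List.mem_cons.mp h with rfl | h
      · left; rw [PySem.Dict.get?_insert_self]; simp
      · right; exact h

-- dict lookups land in [0, |friends|); members of friends are found
theorem pv_idx_bounds (friends : List String) (s : String) (v : Int)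
    (h : (pvB_idx friends).get? s = some v) : 0 ≤ v ∧ v < friends.length := by
  have := pv_foldins_bounds friends PySem.Dict.empty 0 le_rfl
    (fun s v hv => by simp [PySem.Dict.get?_empty] at hv) s v (by exact h)
  omega

theorem pv_idx_mem (friends : List String) (s : String) (h : s ∈ friends) :
    ((pvB_idx friends).get? s).isSome := by
  exact pv_foldins_mem friends PySem.Dict.empty 0 s (Or.inr h)

-- the per-line part of Pre_
def pvPreLine (friends : List String) (line : String) : Prop :=
  ((PySem.Str.split? line " ").getD []).length = 2 ∧
    ∀ x ∈ (PySem.Str.split? line " ").getD [], x ∈ friends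

theorem pvPreLine_pair (friends : List String) (line : String) (h : pvPreLine friends line) :
    ∃ a b, PySem.Str.split? line " " = some [a, b] ∧ a ∈ friends ∧ b ∈ friends := by
  obtain ⟨h2, hmem⟩ := h
  have hsome : (PySem.Str.split? line " ").isSome := by
    simp [PySem.Str.split?, PySem.Chars.split?]
  obtain ⟨l, hl⟩ := Option.isSome_iff_exists.mp hsome
  rw [hl] at h2 hmem
  match l, h2 with
  | [a, b], _ =>
    exact ⟨a, b, hl, hmem a (by simp), hmem b (by simp)⟩

-- the (giver,receiver) index pair of a line, as A and B both compute it
theorem pv_pair_lookup (friends : List String) (line a b : String)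
    (hs : PySem.Str.split? line " " = some [a, b]) (ha : a ∈ friends) (hb : b ∈ friends) :
    ∃ va vb, (pvB_idx friends).get? a = some va ∧ (pvB_idx friends).get? b = some vb ∧
      pvPair (pvB_idx friends) line = (va, vb) := by
  obtain ⟨va, hva⟩ := Option.isSome_iff_exists.mp (pv_idx_mem friends a ha)
  obtain ⟨vb, hvb⟩ := Option.isSome_iff_exists.mp (pv_idx_mem friends b hb)
  refine ⟨va, vb, hva, hvb, ?_⟩
  simp [pvPair, hs, PySem.Dict.getD_eq_get?_getD, hva, hvb]

theorem pv_gp_bounds (friends gifts : List String)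
    (h : ∀ line ∈ gifts, pvPreLine friends line) :
    ∀ p ∈ pvGP friends gifts,
      (0 ≤ p.1 ∧ p.1 < friends.length) ∧ (0 ≤ p.2 ∧ p.2 < friends.length) := by
  intro p hp
  obtain ⟨line, hline, rfl⟩ := List.mem_map.mp hp
  obtain ⟨a, b, hs, ha, hb⟩ := pvPreLine_pair friends line (h line hline)
  obtain ⟨va, vb, hva, hvb, hpair⟩ := pv_pair_lookup friends line a b hs ha hb
  rw [hpair]
  exact ⟨pv_idx_bounds friends a va hva, pv_idx_bounds friends b vb hvb⟩

-- ===== matrix phase (A) =====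
def pvMStep (m : List (List Int)) (p : Nat × Nat) : List (List Int) :=
  m.modify p.1 (fun row => row.modify p.2 (· + 1))

def pvPS (friends gifts : List String) : List (Nat × Nat) :=
  (pvGP friends gifts).map (fun p => (p.1.toNat, p.2.toNat))

theorem pvA_matrix_eq (friends gifts : List String) (N : Nat)
    (h : ∀ line ∈ gifts, pvPreLine friends line) :
    pvA_matrix N (pvA_dict friends) gifts
      = (pvPS friends gifts).foldl pvMStep (List.replicate N (List.replicate N (0 : Int))) := by
  unfold pvA_matrix pvPS pvGP
  rw [pvA_dict_eq]
  generalize (List.replicate N (List.replicate N (0 : Int))) = m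
  induction gifts generalizing m with
  | nil => rfl
  | cons line t ih =>
    obtain ⟨a, b, hs, ha, hb⟩ := pvPreLine_pair friends line (h line (by simp))
    obtain ⟨va, vb, hva, hvb, hpair⟩ := pv_pair_lookup friends line a b hs ha hb
    simp only [List.foldl_cons, List.map_cons, hs, hva, hvb, hpair]
    exact ih (fun l hl => h l (by simp [hl])) _

-- getD through a single in-range modify (general modifier)
theorem pv_modify_getD_f (l : List Int) (f : Int → Int) (k j : Nat) (hj : j < l.length) :
    (l.modify k f).getD j 0 = if j = k then f (l.getD j 0) else l.getD j 0 := by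
  rw [List.getD_eq_getElem?_getD, List.getD_eq_getElem?_getD, List.getElem?_modify,
    List.getElem?_eq_getElem hj]
  by_cases h : j = k
  · simp [h]
  · have h' : ¬ k = j := fun hh => h hh.symm
    simp [h, h']

theorem pv_modify_getD (l : List Int) (k j : Nat) (hj : j < l.length) :
    (l.modify k (· + 1)).getD j 0 = l.getD j 0 + if j = k then 1 else 0 := by
  rw [pv_modify_getD_f l _ k j hj]
  by_cases h : j = k <;> simp [h]

theorem pv_modify_row_getD (m : List (List Int)) (f : List Int → List Int) (k i : Nat)
    (hi : i < m.length) :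
    (m.modify k f).getD i [] = if k = i then f (m.getD i []) else m.getD i [] := by
  rw [List.getD_eq_getElem?_getD, List.getD_eq_getElem?_getD, List.getElem?_modify,
    List.getElem?_eq_getElem hi]
  by_cases h : k = i <;> simp [h]

-- one entry of the matrix fold
theorem pv_mfold_entry (ps : List (Nat × Nat)) : ∀ (m : List (List Int)),
    (∀ p ∈ ps, p.1 < m.length ∧ p.2 < m.length) →
    (∀ i, i < m.length → (m.getD i []).length = m.length) →
    ∀ i j, i < m.length → j < m.length →
      ((ps.foldl pvMStep m).getD i []).getD j 0 = (m.getD i []).getD j 0 + (ps.count (i, j) : Int) := by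
  induction ps with
  | nil => intro m _ _ i j hi hj; simp
  | cons p t ih =>
    intro m hb hrows i j hi hj
    rw [List.foldl_cons]
    have hlen : (pvMStep m p).length = m.length := by simp [pvMStep]
    have hgetD : ∀ i, i < m.length →
        (pvMStep m p).getD i [] = if p.1 = i then (m.getD i []).modify p.2 (· + 1) else m.getD i [] := by
      intro i hi; exact pv_modify_row_getD m _ p.1 i hi
    have hrows' : ∀ i, i < (pvMStep m p).length →
        ((pvMStep m p).getD i []).length = (pvMStep m p).length := by
      intro i hi; rw [hlen] at hi ⊢; rw [hgetD i hi]
      split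
      · rw [List.length_modify]; exact hrows i hi
      · exact hrows i hi
    have hmain := ih (pvMStep m p) (by rw [hlen]; exact fun q hq => hb q (by simp [hq])) hrows' i j
      (by rw [hlen]; exact hi) (by rw [hlen]; exact hj)
    rw [hmain, hgetD i hi]
    have hentry : (if p.1 = i then (m.getD i []).modify p.2 (· + 1) else m.getD i []).getD j 0
        = (m.getD i []).getD j 0 + if (i, j) = p then 1 else 0 := by
      clear hmain hgetD hrows' ih hb
      obtain ⟨p1, p2⟩ := p
      split
      · rename_i h1
        simp only at h1
        rw [pv_modify_getD (m.getD i []) p2 j (by rw [hrows i hi]; exact hj)]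
        congr 1
        by_cases h2 : j = p2 <;> simp [Prod.mk.injEq, h2, h1]
      · rename_i h1
        simp only at h1
        have : ¬ (i, j) = (p1, p2) := by simp [Prod.mk.injEq]; intro h; exact absurd h.symm h1
        simp [this]
    rw [hentry, List.count_cons]
    have hbeq : ((p == (i, j)) = true) ↔ ((i, j) = p) := by
      constructor
      · intro h; exact (eq_of_beq h).symm
      · intro h; exact beq_iff_eq.mpr h.symm
    by_cases hc : (i, j) = p
    · simp only [if_pos hc, if_pos (hbeq.mpr hc)]; push_cast; ring
    · simp only [if_neg hc, if_neg (fun hh => hc (hbeq.mp hh))]; push_cast; ring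

-- ===== one-pass phase of B =====
def pvVStep (l : List Int) (k : Nat) : List Int := l.modify k (· + 1)

theorem pv_vfold_entry (ks : List Nat) : ∀ (l : List Int), ∀ i, i < l.length →
    (ks.foldl pvVStep l).getD i 0 = l.getD i 0 + (ks.count i : Int) := by
  induction ks with
  | nil => intro l i hi; simp
  | cons k t ih =>
    intro l i hi
    rw [List.foldl_cons]
    have hlen : (pvVStep l k).length = l.length := by simp [pvVStep]
    rw [ih (pvVStep l k) i (by rw [hlen]; exact hi), pvVStep, pv_modify_getD l k i hi,
      List.count_cons]
    by_cases hc : i = k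
    · simp [hc]; ring
    · have : ¬ (k == i) = true := by simpa [beq_iff_eq] using fun hh => hc hh.symm
      simp [hc, this]

-- B's single pass splits into four independent folds
def pvPairStep (d : PySem.Dict (Int × Int) Bool) (p : Int × Int) : PySem.Dict (Int × Int) Bool :=
  if p.1 ≠ p.2 then d.insert (min p.1 p.2, max p.1 p.2) true else d

theorem pvB_state_fold (friends : List String) (gifts : List String)
    (h : ∀ line ∈ gifts, pvPreLine friends line) :
    ∀ (c : PySem.Dict (Int × Int) Int) (g t : List Int) (pd : PySem.Dict (Int × Int) Bool),
    gifts.foldl (fun st line =>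
      match PySem.Str.split? line " " with
      | some [a, b] =>
        match (pvB_idx friends).get? a, (pvB_idx friends).get? b with
        | some ia, some ib =>
            (st.1.insert (ia, ib) (st.1.getD (ia, ib) 0 + 1),
             st.2.1.modify ia.toNat (· + 1),
             st.2.2.1.modify ib.toNat (· + 1),
             if ia ≠ ib then st.2.2.2.insert (min ia ib, max ia ib) true else st.2.2.2)
        | _, _ => st
      | _ => st) (c, g, t, pd)
      = ((gifts.map (pvPair (pvB_idx friends))).foldl (fun c p => c.insert p (c.getD p 0 + 1)) c,
         ((gifts.map (pvPair (pvB_idx friends))).map (fun p => p.1.toNat)).foldl pvVStep g,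
         ((gifts.map (pvPair (pvB_idx friends))).map (fun p => p.2.toNat)).foldl pvVStep t,
         (gifts.map (pvPair (pvB_idx friends))).foldl pvPairStep pd) := by
  induction gifts with
  | nil => intro c g t pd; rfl
  | cons line rest ih =>
    intro c g t pd
    obtain ⟨a, b, hs, ha, hb⟩ := pvPreLine_pair friends line (h line (by simp))
    obtain ⟨va, vb, hva, hvb, hpair⟩ := pv_pair_lookup friends line a b hs ha hb
    simp only [List.foldl_cons, List.map_cons, hs, hva, hvb, hpair, pvPairStep]
    exact ih (fun l hl => h l (by simp [hl])) _ _ _ _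

theorem pvB_state_eq (friends gifts : List String) (n : Nat)
    (h : ∀ line ∈ gifts, pvPreLine friends line) :
    pvB_state (pvB_idx friends) n gifts
      = ((pvGP friends gifts).foldl (fun c p => c.insert p (c.getD p 0 + 1)) PySem.Dict.empty,
         ((pvGP friends gifts).map (fun p => p.1.toNat)).foldl pvVStep (List.replicate n (0 : Int)),
         ((pvGP friends gifts).map (fun p => p.2.toNat)).foldl pvVStep (List.replicate n (0 : Int)),
         (pvGP friends gifts).foldl pvPairStep PySem.Dict.empty) := by
  unfold pvB_state pvGP
  exact pvB_state_fold friends gifts h _ _ _ _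

-- counts of index pairs under the toNat maps
theorem pv_count_ps (gp : List (Int × Int)) (hb : ∀ p ∈ gp, 0 ≤ p.1 ∧ 0 ≤ p.2) (i j : Nat) :
    ((gp.map (fun p => (p.1.toNat, p.2.toNat))).count (i, j) : Int) = pvCnt gp i j := by
  unfold pvCnt
  congr 1
  induction gp with
  | nil => simp
  | cons q t ih =>
    have hq := hb q (by simp)
    rw [List.map_cons, List.count_cons, List.count_cons, ih (fun p hp => hb p (by simp [hp]))]
    congr 1
    obtain ⟨q1, q2⟩ := q
    by_cases h1 : q1 = (i : Int) <;> by_cases h2 : q2 = (j : Int) <;>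
      simp [beq_iff_eq, Prod.mk.injEq, h1, h2] <;> omega

theorem pv_count_fst (gp : List (Int × Int)) (hb : ∀ p ∈ gp, 0 ≤ p.1) (i : Nat) :
    (gp.map (fun p => p.1.toNat)).count i = gp.countP (fun p => p.1 == (i : Int)) := by
  induction gp with
  | nil => simp
  | cons q t ih =>
    have hq := hb q (by simp)
    rw [List.map_cons, List.count_cons, List.countP_cons, ih (fun p hp => hb p (by simp [hp]))]
    congr 1
    by_cases h1 : q.1 = (i : Int) <;> (simp [beq_iff_eq, h1]; try omega)

theorem pv_count_snd (gp : List (Int × Int)) (hb : ∀ p ∈ gp, 0 ≤ p.2) (i : Nat) :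
    (gp.map (fun p => p.2.toNat)).count i = gp.countP (fun p => p.2 == (i : Int)) := by
  induction gp with
  | nil => simp
  | cons q t ih =>
    have hq := hb q (by simp)
    rw [List.map_cons, List.count_cons, List.countP_cons, ih (fun p hp => hb p (by simp [hp]))]
    congr 1
    by_cases h1 : q.2 = (i : Int) <;> (simp [beq_iff_eq, h1]; try omega)

-- ===== gift index phase (A) =====
theorem pv_sum_cnt_fst (gp : List (Int × Int)) (N i : Nat)
    (hb : ∀ p ∈ gp, 0 ≤ p.2 ∧ p.2 < (N : Int)) :
    ((List.range N).map (fun j => pvCnt gp i j)).sum = (gp.countP (fun p => p.1 == (i : Int)) : Int) := by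
  induction gp with
  | nil => simp [pvCnt]
  | cons q t ih =>
    have hq := hb q (by simp)
    have hcnt : ∀ j : Nat, pvCnt (q :: t) i j
        = pvCnt t i j + if (q == ((i : Int), (j : Int))) then 1 else 0 := by
      intro j; unfold pvCnt; rw [List.count_cons]; push_cast; split <;> simp
    calc ((List.range N).map (fun j => pvCnt (q :: t) i j)).sum
        = ((List.range N).map (fun j => pvCnt t i j)).sum
          + ((List.range N).map (fun (j : Nat) => if (q == ((i : Int), (j : Int))) then (1 : Int) else 0)).sum := by
          rw [← PySem.List.sum_map_add_int]
          apply congrArg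
          exact List.map_congr_left (fun j _ => hcnt j)
      _ = (t.countP (fun p => p.1 == (i : Int)) : Int)
          + ((List.range N).map (fun (j : Nat) => if (q == ((i : Int), (j : Int))) then (1 : Int) else 0)).sum := by
          rw [ih (fun p hp => hb p (by simp [hp]))]
      _ = ((q :: t).countP (fun p => p.1 == (i : Int)) : Int) := by
          rw [PySem.List.sum_map_ite_one_zero, List.countP_cons]
          obtain ⟨q1, q2⟩ := q
          by_cases h1 : q1 = (i : Int)
          · have hcp : (List.range N).countP (fun (j : Nat) => ((q1, q2) == ((i : Int), (j : Int)))) =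
                (List.range N).countP (fun j => j == q2.toNat) := by
              apply List.countP_congr
              intro j hj
              simp only [beq_iff_eq, Prod.mk.injEq, h1, true_and]
              constructor
              · intro hh; omega
              · intro hh; omega
            rw [hcp]
            have : (List.range N).countP (fun j => j == q2.toNat) = (List.range N).count q2.toNat := by
              rw [List.count]
            rw [this, List.count_eq_one_of_mem List.nodup_range (by simp; omega)]
            simp [h1]
          · have hcp : (List.range N).countP (fun (j : Nat) => ((q1, q2) == ((i : Int), (j : Int)))) = 0 := by
              apply List.countP_eq_zero.mpr
              intro j hj
              simp [beq_iff_eq, Prod.mk.injEq, h1]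
            rw [hcp]
            simp [h1]

theorem pv_sum_cnt_snd (gp : List (Int × Int)) (N i : Nat)
    (hb : ∀ p ∈ gp, 0 ≤ p.1 ∧ p.1 < (N : Int)) :
    ((List.range N).map (fun j => pvCnt gp j i)).sum = (gp.countP (fun p => p.2 == (i : Int)) : Int) := by
  have hsw : ∀ j : Nat, pvCnt gp j i = pvCnt (gp.map Prod.swap) i j := by
    intro j; unfold pvCnt; congr 1
    clear hb
    induction gp with
    | nil => simp
    | cons q t ih2 =>
      rw [List.map_cons, List.count_cons, List.count_cons, ih2]
      congr 1
      obtain ⟨q1, q2⟩ := q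
      simp [beq_iff_eq, Prod.mk.injEq, Prod.swap, and_comm]
  calc ((List.range N).map (fun j => pvCnt gp j i)).sum
      = ((List.range N).map (fun j => pvCnt (gp.map Prod.swap) i j)).sum := by
        exact congrArg _ (List.map_congr_left (fun j _ => hsw j))
    _ = ((gp.map Prod.swap).countP (fun p => p.1 == (i : Int)) : Int) := by
        apply pv_sum_cnt_fst
        intro p hp
        obtain ⟨q, hq, rfl⟩ := List.mem_map.mp hp
        exact hb q hq
    _ = (gp.countP (fun p => p.2 == (i : Int)) : Int) := by
        rw [List.countP_map]
        rfl

theorem pvA_giftIdx_entry (N : Nat) (results : List (List Int)) (i : Nat) (hi : i < N) :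
    (pvA_giftIdx N results).getD i 0 =
      ((List.range N).map (fun j => (results.getD i []).getD j 0)).sum
      - ((List.range N).map (fun j => (results.getD j []).getD i 0)).sum := by
  unfold pvA_giftIdx
  rw [PySem.List.getD_map_range _ _ _ _ hi]
  simp only [PySem.List.foldl_add, zero_add]

-- ===== triangular phase (A) =====
def pvPStep (b : Nat → Nat → Bool) (res : List Int) (p : Nat × Nat) : List Int :=
  if b p.1 p.2 then res.modify p.1 (· + 1)
  else if b p.2 p.1 then res.modify p.2 (· + 1)
  else res

def pvGain (b : Nat → Nat → Bool) (m : Nat) (p : Nat × Nat) : Bool :=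
  (p.1 == m && b p.1 p.2) || (p.2 == m && !(b p.1 p.2) && b p.2 p.1)

def pvPairs (N : Nat) : List (Nat × Nat) :=
  (List.range (N - 1)).flatMap (fun i => (List.range' (i + 1) (N - 1 - i)).map (fun j => (i, j)))

theorem pv_pairs_mem (N : Nat) (p : Nat × Nat) (hp : p ∈ pvPairs N) :
    p.1 < p.2 ∧ p.2 < N := by
  obtain ⟨i, hi, hq⟩ := List.mem_flatMap.mp hp
  obtain ⟨j, hj, rfl⟩ := List.mem_map.mp hq
  have hi' := List.mem_range.mp hi
  have hj' := List.mem_range'_1.mp hj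
  simp only
  omega

theorem pv_pstep_len (b : Nat → Nat → Bool) (res : List Int) (p : Nat × Nat) :
    (pvPStep b res p).length = res.length := by
  unfold pvPStep; split <;> [skip; split] <;> simp

theorem pv_pfold_entry (b : Nat → Nat → Bool) (ps : List (Nat × Nat)) : ∀ (res : List Int),
    (∀ p ∈ ps, p.1 < res.length ∧ p.2 < res.length) → ∀ m, m < res.length →
    (ps.foldl (pvPStep b) res).getD m 0 = res.getD m 0 + (ps.countP (pvGain b m) : Int) := by
  induction ps with
  | nil => intro res _ m hm; simp
  | cons p t ih =>
    intro res hb m hm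
    rw [List.foldl_cons]
    have hp := hb p (by simp)
    have hmain := ih (pvPStep b res p)
      (by rw [pv_pstep_len]; exact fun q hq => hb q (by simp [hq]))
      m (by rw [pv_pstep_len]; exact hm)
    rw [hmain, List.countP_cons]
    have hstep : (pvPStep b res p).getD m 0 = res.getD m 0 + if pvGain b m p then 1 else 0 := by
      unfold pvPStep
      by_cases hb1 : b p.1 p.2
      · rw [if_pos hb1, pv_modify_getD res p.1 m hm]
        congr 1
        by_cases hc : m = p.1
        · simp [pvGain, hb1, hc]
        · have h' : ¬ (p.1 == m) = true := by simpa [beq_iff_eq] using fun hh => hc hh.symm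
          simp [pvGain, hb1, hc, h']
      · by_cases hb2 : b p.2 p.1
        · rw [if_neg hb1, if_pos hb2, pv_modify_getD res p.2 m hm]
          congr 1
          by_cases hc : m = p.2
          · simp [pvGain, hb1, hb2, hc]
          · have h' : ¬ (p.2 == m) = true := by simpa [beq_iff_eq] using fun hh => hc hh.symm
            simp [pvGain, hb1, hb2, hc, h']
        · rw [if_neg hb1, if_neg hb2]
          simp [pvGain, hb1, hb2]
    rw [hstep]
    push_cast
    ring

theorem pv_countP_flatMap {α β : Type} (L : List α) (f : α → List β) (q : β → Bool) :
    (L.flatMap f).countP q = (L.map (fun i => (f i).countP q)).sum := by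
  induction L with
  | nil => simp
  | cons a t ih => simp [List.countP_append, ih]

theorem pv_sum_ite_single (n m C : Nat) :
    ((List.range n).map (fun i => if i = m then C else 0)).sum = if m < n then C else 0 := by
  induction n with
  | zero => simp
  | succ k ih =>
    rw [List.range_succ, List.map_append, List.sum_append, ih]
    by_cases h1 : m < k
    · simp [h1, Nat.lt_succ_of_lt h1, Nat.ne_of_gt h1]
    · by_cases h2 : k = m
      · subst h2; simp
      · have : ¬ m < k + 1 := by omega
        simp [h1, h2, this]

theorem pv_sum_boole {α : Type} (l : List α) (p : α → Bool) :
    (l.map (fun x => if p x then 1 else 0)).sum = l.countP p := by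
  induction l with
  | nil => simp
  | cons a t ih => by_cases h : p a <;> (simp [h, ih]; try omega)

theorem pv_sum_map_add_nat {α : Type} (l : List α) (f g : α → Nat) :
    (l.map (fun x => f x + g x)).sum = (l.map f).sum + (l.map g).sum := by
  induction l with
  | nil => simp
  | cons a t ih => simp [ih]; omega

-- the triangular double loop credits m exactly once for every opponent it beats
theorem pv_countP_gain (b : Nat → Nat → Bool) (N m : Nat) (hm : m < N)
    (hasym : ∀ i j, b i j = true → b j i = false) :
    (pvPairs N).countP (pvGain b m)
      = (List.range N).countP (fun j => decide (j ≠ m) && b m j) := by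
  unfold pvPairs
  rw [pv_countP_flatMap]
  have hpt : ∀ i ∈ List.range (N - 1),
      ((List.range' (i + 1) (N - 1 - i)).map (fun j => (i, j))).countP (pvGain b m)
        = (if i = m then (List.range' (m + 1) (N - 1 - m)).countP (b m) else 0)
          + (if decide (i < m) && b m i then 1 else 0) := by
    intro i hi
    rw [List.countP_map]
    by_cases him : i = m
    · subst him
      have h2 : ¬ (decide (i < i) && b i i) = true := by simp
      rw [if_pos rfl, if_neg h2, Nat.add_zero]
      apply List.countP_congr
      intro j hj
      have hj' := List.mem_range'_1.mp hj
      have : (j == i) = false := by simp; omega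
      simp [Function.comp, pvGain, this]
    · by_cases hlt : i < m
      · have hc1 : ∀ j ∈ List.range' (i + 1) (N - 1 - i),
            (pvGain b m ∘ fun j => (i, j)) j = ((j == m) && (!(b i m) && b m i)) := by
          intro j hj
          have hin : (i == m) = false := by simp [him]
          by_cases hjm : j = m
          · subst hjm; simp [Function.comp, pvGain, hin]
          · have : (j == m) = false := by simp [hjm]
            simp [Function.comp, pvGain, hin, this]
        rw [List.countP_congr (fun j hj => by rw [hc1 j hj])]
        have hmmem : m ∈ List.range' (i + 1) (N - 1 - i) := by
          rw [List.mem_range'_1]; omega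
        by_cases hbm : b m i = true
        · have hbim : b i m = false := hasym m i hbm
          have hconst : ∀ j : Nat, ((j == m) && (!(b i m) && b m i)) = (j == m) := by
            intro j; rw [hbim, hbm]; simp
          rw [List.countP_congr (fun j _ => by rw [hconst j])]
          have hcount : (List.range' (i + 1) (N - 1 - i)).countP (fun j => j == m)
              = (List.range' (i + 1) (N - 1 - i)).count m := by rw [List.count]
          rw [hcount, List.count_eq_one_of_mem (List.nodup_range' 1) hmmem]
          simp [him, hlt, hbm]
        · have hbm' : b m i = false := by revert hbm; cases b m i <;> simp
          have hconst : ∀ j : Nat, ((j == m) && (!(b i m) && b m i)) = false := by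
            intro j; rw [hbm']; simp
          rw [List.countP_congr (fun j _ => by rw [hconst j])]
          simp [him, hbm']
      · have : ∀ j ∈ List.range' (i + 1) (N - 1 - i), ¬ (pvGain b m ∘ fun j => (i, j)) j = true := by
          intro j hj
          have hj' := List.mem_range'_1.mp hj
          have hin : (i == m) = false := by simp [him]
          have hjn : (j == m) = false := by simp; omega
          simp [Function.comp, pvGain, hin, hjn]
        rw [List.countP_eq_zero.mpr this]
        have : ¬ (decide (i < m) && b m i) = true := by simp [hlt]
        simp [him, this]
  rw [List.map_congr_left hpt, pv_sum_map_add_nat]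
  have hfirst : ((List.range (N - 1)).map
      (fun i => if i = m then (List.range' (m + 1) (N - 1 - m)).countP (b m) else 0)).sum
      = (List.range' (m + 1) (N - 1 - m)).countP (b m) := by
    rw [pv_sum_ite_single]
    by_cases hmN : m < N - 1
    · rw [if_pos hmN]
    · have h0 : N - 1 - m = 0 := by omega
      rw [if_neg hmN, h0]
      simp
  have hsecond : ((List.range (N - 1)).map (fun i => if decide (i < m) && b m i then 1 else 0)).sum
      = (List.range m).countP (b m) := by
    rw [pv_sum_boole]
    have hsplit : List.range (N - 1) = List.range m ++ List.range' m (N - 1 - m) := by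
      rw [List.range_eq_range', List.range_eq_range']
      have hap := @List.range'_append 0 m (N - 1 - m) 1
      simp only [Nat.one_mul, Nat.zero_add] at hap
      conv_lhs => rw [show N - 1 = m + (N - 1 - m) from by omega]
      rw [← hap]
    rw [hsplit, List.countP_append]
    have h1 : (List.range m).countP (fun i => decide (i < m) && b m i) = (List.range m).countP (b m) := by
      apply List.countP_congr
      intro i hi
      have := List.mem_range.mp hi
      simp [this]
    have h2 : (List.range' m (N - 1 - m)).countP (fun i => decide (i < m) && b m i) = 0 := by
      apply List.countP_eq_zero.mpr
      intro i hi
      have := List.mem_range'_1.mp hi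
      simp; omega
    rw [h1, h2]
    omega
  rw [hfirst, hsecond]
  have hsplitN : List.range N = (List.range m ++ [m]) ++ List.range' (m + 1) (N - 1 - m) := by
    rw [List.range_eq_range', List.range_eq_range']
    have h1 := @List.range'_append 0 m 1 1
    simp only [Nat.one_mul, Nat.zero_add] at h1
    have h2 := @List.range'_append 0 (m + 1) (N - 1 - m) 1
    simp only [Nat.one_mul, Nat.zero_add] at h2
    conv_lhs => rw [show N = (m + 1) + (N - 1 - m) from by omega]
    rw [← h2, ← h1]
    congr 1
  rw [hsplitN, List.countP_append, List.countP_append]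
  have hmid : ([m] : List Nat).countP (fun j => decide (j ≠ m) && b m j) = 0 := by simp
  have hlow : (List.range m).countP (fun j => decide (j ≠ m) && b m j) = (List.range m).countP (b m) := by
    apply List.countP_congr
    intro j hj
    have := List.mem_range.mp hj
    have : j ≠ m := by omega
    simp [this]
  have hhigh : (List.range' (m + 1) (N - 1 - m)).countP (fun j => decide (j ≠ m) && b m j)
      = (List.range' (m + 1) (N - 1 - m)).countP (b m) := by
    apply List.countP_congr
    intro j hj
    have := List.mem_range'_1.mp hj
    have : j ≠ m := by omega
    simp [this]
  rw [hmid, hlow, hhigh]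
  omega

theorem pv_pfold_len_list (b : Nat → Nat → Bool) (ps : List (Nat × Nat)) :
    ∀ (res : List Int), (ps.foldl (pvPStep b) res).length = res.length := by
  induction ps with
  | nil => intro res; rfl
  | cons p t ih => intro res; rw [List.foldl_cons, ih, pv_pstep_len]

-- A's if/elif chain is the conditional-increment step for the 'beats' relation
theorem pv_body_eq (cij cji gi gj : Int) (res : List Int) (i j : Nat) :
    (if cji < cij then res.modify i (· + 1)
     else if cij < cji then res.modify j (· + 1)
     else if gj < gi then res.modify i (· + 1)
     else if gi < gj then res.modify j (· + 1)
     else res)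
    = (if (decide (cji < cij) || (decide (cij = cji) && decide (gj < gi))) then res.modify i (· + 1)
       else if (decide (cij < cji) || (decide (cji = cij) && decide (gi < gj))) then res.modify j (· + 1)
       else res) := by
  simp only [Bool.or_eq_true, Bool.and_eq_true, decide_eq_true_eq]
  split_ifs <;> first | rfl | (exfalso; omega)

theorem pvA_result_eq (N : Nat) (results : List (List Int)) (giftIdx : List Int) :
    pvA_result N results giftIdx
      = (pvPairs N).foldl (pvPStep (fun i j =>
          decide ((results.getD j []).getD i 0 < (results.getD i []).getD j 0)
          || (decide ((results.getD i []).getD j 0 = (results.getD j []).getD i 0)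
              && decide (giftIdx.getD j 0 < giftIdx.getD i 0)))) (List.replicate N (0 : Int)) := by
  unfold pvA_result pvPairs
  rw [List.foldl_flatMap]
  apply PySem.List.foldl_congr_mem
  intro acc i _
  rw [List.foldl_map]
  apply PySem.List.foldl_congr_mem
  intro res j _
  exact pv_body_eq _ _ _ _ res i j

theorem pvBt_asym (gp : List (Int × Int)) (i j : Nat) (h : pvBt gp i j = true) :
    pvBt gp j i = false := by
  by_contra hc
  rw [Bool.not_eq_false] at hc
  unfold pvBt at h hc
  simp only [Bool.or_eq_true, Bool.and_eq_true, decide_eq_true_eq] at h hc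
  omega

theorem pvBt_self (gp : List (Int × Int)) (m : Nat) : pvBt gp m m = false := by
  unfold pvBt
  simp

-- ===== B's ranking phase =====

-- the first-occurrence dict records index? of each key
theorem pv_first_fold (o : List Int) : ∀ (k : Int) (d : PySem.Dict Int Int) (x : Int),
    ((PySem.List.enumerate o k).foldl
        (fun (d : PySem.Dict Int Int) p => if d.contains p.2 then d else d.insert p.2 p.1) d).get? x
      = if d.contains x then d.get? x
        else Option.map (fun i : Nat => (i : Int) + k) (PySem.List.index? o x) := by
  induction o with
  | nil =>
    intro k d x
    simp only [PySem.List.enumerate_nil, List.foldl_nil]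
    have h0 : PySem.List.index? ([] : List Int) x = none := by
      simp [PySem.List.index?]
    rw [h0]
    by_cases h : d.contains x
    · simp [h]
    · rw [if_neg (by simp [h])]
      simp [(PySem.Dict.get?_eq_none_iff_contains d x).mpr (by simpa using h)]
  | cons a t ih =>
    intro k d x
    rw [PySem.List.enumerate_cons, List.foldl_cons]
    by_cases hda : d.contains a
    · simp only [if_pos hda]
      rw [ih (k + 1) d x]
      by_cases hdx : d.contains x
      · simp [hdx]
      · have hax : a ≠ x := fun h => by rw [h] at hda; exact absurd hda (by simp [hdx])
        rw [if_neg (by simp [hdx]), if_neg (by simp [hdx]),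
          PySem.List.index?_cons_of_ne t hax]
        cases hix : PySem.List.index? t x
        · simp
        · simp only [Option.map_some, Option.some.injEq]
          omega
    · simp only [if_neg hda]
      rw [ih (k + 1) (d.insert a k) x]
      by_cases hax : x = a
      · subst hax
        rw [if_pos (by simp),
          PySem.Dict.get?_insert_self, if_neg hda, PySem.List.index?_cons_self]
        simp
      · have h1 : (d.insert a k).contains x = d.contains x := by
          rw [PySem.Dict.contains_insert]
          simp [hax]
        rw [h1]
        by_cases hdx : d.contains x
        · rw [if_pos (by simpa using hdx), if_pos (by simpa using hdx),
            PySem.Dict.get?_insert_of_ne d k hax]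
        · rw [if_neg (by simp [hdx]), if_neg (by simp [hdx]),
            PySem.List.index?_cons_of_ne t (fun h => hax h.symm)]
          cases hix : PySem.List.index? t x
          · simp
          · simp only [Option.map_some, Option.some.injEq]
            omega

theorem pv_index_mem_isSome (o : List Int) (x : Int) (h : x ∈ o) :
    (PySem.List.index? o x).isSome := by
  induction o with
  | nil => simp at h
  | cons a t ih =>
    by_cases hax : a = x
    · subst hax; rw [PySem.List.index?_cons_self]; simp
    · rw [PySem.List.index?_cons_of_ne t hax]
      have h' : x ∈ t := (List.mem_cons.mp h).resolve_left (fun hh => hax hh.symm)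
      have := ih h'
      cases hq : PySem.List.index? t x
      · rw [hq] at this; simp at this
      · simp

-- in a nondecreasing list, the first index of x counts the elements below x
theorem pv_sorted_index_countP (o : List Int) (x : Int) (k : Nat)
    (hs : o.Pairwise (· ≤ ·)) (hk : PySem.List.index? o x = some k) :
    o.countP (fun y => decide (y < x)) = k := by
  obtain ⟨pre, suf, rfl, hlen, hnot⟩ := (PySem.List.index?_eq_some_iff _ _ _).mp hk
  rw [List.pairwise_append] at hs
  obtain ⟨hpre, hsuf, hcross⟩ := hs
  rw [List.countP_append]
  have h1 : pre.countP (fun y => decide (y < x)) = pre.length := by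
    rw [List.countP_eq_length]
    intro y hy
    have hle := hcross y hy x (by simp)
    have hne : y ≠ x := fun h => hnot (h ▸ hy)
    simp; omega
  have h2 : (x :: suf).countP (fun y => decide (y < x)) = 0 := by
    rw [List.countP_eq_zero]
    intro y hy
    rcases List.mem_cons.mp hy with rfl | hy'
    · simp
    · have := (List.pairwise_cons.mp hsuf).1 y hy'
      simp; omega
  omega

-- ===== B's sparse-correction phase =====

-- canonical form of one correction step
def pvCStep (gp : List (Int × Int)) (w : List Int) (p : Int × Int) : List Int :=
  if pvCnt gp p.1.toNat p.2.toNat ≠ pvCnt gp p.2.toNat p.1.toNat then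
    (if pvS gp p.2.toNat < pvS gp p.1.toNat then
        (if pvCnt gp p.2.toNat p.1.toNat < pvCnt gp p.1.toNat p.2.toNat then
          (w.modify p.1.toNat (· - 1)).modify p.1.toNat (· + 1)
        else (w.modify p.1.toNat (· - 1)).modify p.2.toNat (· + 1))
     else if pvS gp p.1.toNat < pvS gp p.2.toNat then
        (if pvCnt gp p.2.toNat p.1.toNat < pvCnt gp p.1.toNat p.2.toNat then
          (w.modify p.2.toNat (· - 1)).modify p.1.toNat (· + 1)
        else (w.modify p.2.toNat (· - 1)).modify p.2.toNat (· + 1))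
     else
        (if pvCnt gp p.2.toNat p.1.toNat < pvCnt gp p.1.toNat p.2.toNat then
          w.modify p.1.toNat (· + 1)
        else w.modify p.2.toNat (· + 1)))
  else w

-- the per-entry effect of one correction step
def pvCorr (gp : List (Int × Int)) (m : Nat) (p : Int × Int) : Int :=
  if pvCnt gp p.1.toNat p.2.toNat ≠ pvCnt gp p.2.toNat p.1.toNat then
    (if pvS gp p.2.toNat < pvS gp p.1.toNat then (if p.1.toNat = m then (-1 : Int) else 0)
     else if pvS gp p.1.toNat < pvS gp p.2.toNat then (if p.2.toNat = m then (-1 : Int) else 0)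
     else 0)
    + (if pvCnt gp p.2.toNat p.1.toNat < pvCnt gp p.1.toNat p.2.toNat then
        (if p.1.toNat = m then (1 : Int) else 0)
      else (if p.2.toNat = m then (1 : Int) else 0))
  else 0

theorem pv_cstep_len (gp : List (Int × Int)) (w : List Int) (p : Int × Int) :
    (pvCStep gp w p).length = w.length := by
  unfold pvCStep
  split_ifs <;> simp

theorem pv_cstep_entry (gp : List (Int × Int)) (w : List Int) (p : Int × Int) (m : Nat)
    (hm : m < w.length) (h1 : p.1.toNat < w.length) (h2 : p.2.toNat < w.length) :
    (pvCStep gp w p).getD m 0 = w.getD m 0 + pvCorr gp m p := by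
  unfold pvCStep pvCorr
  split_ifs with hc hs1 hcc hs2 hcc hcc <;>
    (try simp only [pv_modify_getD_f, List.length_modify, hm]) <;>
    first
      | (split_ifs <;> omega)
      | omega

theorem pv_cfold_entry (gp : List (Int × Int)) (ps : List (Int × Int)) : ∀ (w : List Int),
    (∀ p ∈ ps, p.1.toNat < w.length ∧ p.2.toNat < w.length) → ∀ m, m < w.length →
    (ps.foldl (pvCStep gp) w).getD m 0 = w.getD m 0 + (ps.map (pvCorr gp m)).sum := by
  induction ps with
  | nil => intro w _ m hm; simp
  | cons p t ih =>
    intro w hb m hm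
    rw [List.foldl_cons]
    have hp := hb p (by simp)
    have := ih (pvCStep gp w p)
      (by rw [pv_cstep_len]; exact fun q hq => hb q (by simp [hq]))
      m (by rw [pv_cstep_len]; exact hm)
    rw [this, pv_cstep_entry gp w p m hm hp.1 hp.2, List.map_cons, List.sum_cons]
    ring

theorem pv_cfold_len (gp : List (Int × Int)) (ps : List (Int × Int)) :
    ∀ (w : List Int), (ps.foldl (pvCStep gp) w).length = w.length := by
  induction ps with
  | nil => intro w; rfl
  | cons p t ih => intro w; rw [List.foldl_cons, ih, pv_cstep_len]

-- the normalized set of pairs that exchanged gifts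
def pvP (gp : List (Int × Int)) : List (Int × Int) :=
  PySem.Set.ofList ((gp.filter (fun p => decide (p.1 ≠ p.2))).map
    (fun p => (min p.1 p.2, max p.1 p.2)))

theorem pv_pairfold_keys (gp : List (Int × Int)) :
    (gp.foldl pvPairStep PySem.Dict.empty).keys = pvP gp := by
  unfold pvPairStep pvP
  rw [PySem.List.foldl_ite_eq_foldl_filter (p := fun q : Int × Int => q.1 ≠ q.2)
    (f := fun (d : PySem.Dict (Int × Int) Bool) q => d.insert (min q.1 q.2, max q.1 q.2) true)]
  rw [PySem.Dict.keys_foldl_insert_key _ (fun p : Int × Int => (min p.1 p.2, max p.1 p.2))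
    (fun _ _ => true) PySem.Dict.empty]
  rfl

theorem pv_mem_pvP (gp : List (Int × Int)) (p : Int × Int) :
    p ∈ pvP gp ↔ ∃ q ∈ gp, q.1 ≠ q.2 ∧ (min q.1 q.2, max q.1 q.2) = p := by
  unfold pvP
  rw [PySem.Set.mem_ofList]
  constructor
  · intro h
    obtain ⟨q, hq, rfl⟩ := List.mem_map.mp h
    obtain ⟨hq1, hq2⟩ := List.mem_filter.mp hq
    exact ⟨q, hq1, by simpa using hq2, rfl⟩
  · rintro ⟨q, hq, hne, rfl⟩
    exact List.mem_map.mpr ⟨q, List.mem_filter.mpr ⟨hq, by simpa using hne⟩, rfl⟩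

theorem pv_pvP_nodup (gp : List (Int × Int)) : (pvP gp).Nodup :=
  PySem.Set.nodup_ofList _

theorem pv_pvP_bounds (gp : List (Int × Int)) (n : Nat)
    (hb : ∀ p ∈ gp, (0 ≤ p.1 ∧ p.1 < (n : Int)) ∧ (0 ≤ p.2 ∧ p.2 < (n : Int))) :
    ∀ p ∈ pvP gp, 0 ≤ p.1 ∧ p.1 < p.2 ∧ p.2 < (n : Int) := by
  intro p hp
  obtain ⟨q, hq, hne, rfl⟩ := (pv_mem_pvP gp p).mp hp
  have := hb q hq
  constructor
  · simp only; omega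
  constructor
  · exact min_lt_max.mpr hne
  · simp only; omega

-- a nonzero directed count puts the normalized pair into pvP
theorem pv_cnt_pos_mem (gp : List (Int × Int)) (i j : Nat) (hne : i ≠ j)
    (h : pvCnt gp i j ≠ 0) : (min (i : Int) j, max (i : Int) j) ∈ pvP gp := by
  have hpos : 0 < gp.count ((i : Int), (j : Int)) := by
    unfold pvCnt at h; omega
  have hmem : ((i : Int), (j : Int)) ∈ gp := List.count_pos_iff.mp hpos
  exact (pv_mem_pvP gp _).mpr ⟨((i : Int), (j : Int)), hmem, by simp; omega, rfl⟩

-- the per-opponent deviation of the true result from the score ranking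
def pvG (gp : List (Int × Int)) (m j : Nat) : Int :=
  (if pvBt gp m j then (1 : Int) else 0) - (if pvS gp j < pvS gp m then (1 : Int) else 0)

theorem pvG_self (gp : List (Int × Int)) (m : Nat) : pvG gp m m = 0 := by
  unfold pvG
  rw [pvBt_self]
  simp

theorem pvG_zero_of_cnt_eq (gp : List (Int × Int)) (m j : Nat)
    (h : pvCnt gp m j = pvCnt gp j m) : pvG gp m j = 0 := by
  unfold pvG pvBt
  rw [h]
  simp only [lt_self_iff_false, decide_false, decide_true, Bool.false_or, Bool.true_and]
  by_cases hs : pvS gp j < pvS gp m <;> simp [hs]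

-- the correction of one stored pair, read at entry m
theorem pv_corr_eq_h (gp : List (Int × Int)) (m : Nat) (p : Int × Int)
    (h1 : 0 ≤ p.1) (h12 : p.1 < p.2) :
    pvCorr gp m p
      = if p.1 = (m : Int) then pvG gp m p.2.toNat
        else if p.2 = (m : Int) then pvG gp m p.1.toNat
        else 0 := by
  have h2 : 0 ≤ p.2 := by omega
  unfold pvCorr pvG pvBt
  by_cases hm1 : p.1 = (m : Int)
  · have hm1' : p.1.toNat = m := by omega
    rw [hm1']
    simp only [Bool.or_eq_true, Bool.and_eq_true, decide_eq_true_eq]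
    split_ifs <;> omega
  · by_cases hm2 : p.2 = (m : Int)
    · have hm2' : p.2.toNat = m := by omega
      rw [hm2']
      simp only [Bool.or_eq_true, Bool.and_eq_true, decide_eq_true_eq]
      split_ifs <;> omega
    · simp only [Bool.or_eq_true, Bool.and_eq_true, decide_eq_true_eq]
      split_ifs <;> omega

-- the deviation vanishes for opponents without an uneven stored pair
theorem pvG_zero_of_not_mem (gp : List (Int × Int)) (m j : Nat) (hjm : j ≠ m)
    (h : (min (m : Int) j, max (m : Int) j) ∉ pvP gp) : pvG gp m j = 0 := by
  apply pvG_zero_of_cnt_eq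
  by_contra hc
  by_cases h1 : pvCnt gp m j ≠ 0
  · exact h (pv_cnt_pos_mem gp m j (fun hh => hjm hh.symm) h1)
  · have h2 : pvCnt gp j m ≠ 0 := by omega
    have := pv_cnt_pos_mem gp j m hjm h2
    rw [show (min (j : Int) m, max (j : Int) m) = (min (m : Int) j, max (m : Int) j) from by
      rw [min_comm, max_comm]] at this
    exact h this

-- the correction sum over the stored pairs is the total deviation over all opponents
theorem pv_corr_sum (gp : List (Int × Int)) (n m : Nat) (hm : m < n)
    (hb : ∀ p ∈ gp, (0 ≤ p.1 ∧ p.1 < (n : Int)) ∧ (0 ≤ p.2 ∧ p.2 < (n : Int))) :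
    ((pvP gp).map (pvCorr gp m)).sum = ((List.range n).map (pvG gp m)).sum := by
  have hPb := pv_pvP_bounds gp n hb
  have hnd := pv_pvP_nodup gp
  -- replace pvCorr by its closed form h
  have hmap : (pvP gp).map (pvCorr gp m)
      = (pvP gp).map (fun p => if p.1 = (m : Int) then pvG gp m p.2.toNat
          else if p.2 = (m : Int) then pvG gp m p.1.toNat else 0) := by
    apply List.map_congr_left
    intro p hp
    have := hPb p hp
    exact pv_corr_eq_h gp m p this.1 this.2.1
  rw [hmap]
  -- pass to Finset sums
  rw [← List.sum_toFinset _ hnd, ← List.sum_toFinset _ List.nodup_range, List.toFinset_range]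
  -- restrict the left sum to pairs touching m
  rw [← Finset.sum_filter_of_ne (s := (pvP gp).toFinset)
      (p := fun p => p.1 = (m : Int) ∨ p.2 = (m : Int))
      (f := fun p => if p.1 = (m : Int) then pvG gp m p.2.toNat
          else if p.2 = (m : Int) then pvG gp m p.1.toNat else 0)
      (by intro p _ hne; by_contra hc; push_neg at hc
          simp [hc.1, hc.2] at hne)]
  -- and the right sum to opponents whose pair is stored
  rw [← Finset.sum_subset (s₁ := (Finset.range n).filter
        (fun j : Nat => ((min (m : Int) (j : Int), max (m : Int) (j : Int)) ∈ pvP gp ∧ j ≠ m)))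
      (Finset.filter_subset _ _)
      (by
        intro j hj hnj
        by_cases hjm : j = m
        · subst hjm; exact pvG_self gp j
        · apply pvG_zero_of_not_mem gp m j hjm
          intro hmem
          exact hnj (Finset.mem_filter.mpr ⟨hj, hmem, hjm⟩))]
  -- the two restricted sums are in bijection
  apply Finset.sum_bij'
    (i := fun p _ => ((if p.1 = (m : Int) then p.2 else p.1).toNat : Nat))
    (j := fun (q : Nat) _ => ((min (m : Int) (q : Int), max (m : Int) (q : Int)) : Int × Int))
  · -- hi: forward map lands in the target
    intro p hp
    rw [Finset.mem_filter] at hp ⊢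
    obtain ⟨hpf, hpm⟩ := hp
    have hpb := hPb p (List.mem_toFinset.mp hpf)
    by_cases hm1 : p.1 = (m : Int)
    · rw [if_pos hm1]
      refine ⟨Finset.mem_range.mpr (by omega), ?_, by omega⟩
      have heq : (min (m : Int) (p.2.toNat : Int), max (m : Int) (p.2.toNat : Int)) = p := by
        have hp2 : ((p.2.toNat : Int)) = p.2 := by omega
        rw [hp2]
        have h1 : min (m : Int) p.2 = p.1 := by omega
        have h2 : max (m : Int) p.2 = p.2 := by omega
        rw [h1, h2]
      rw [heq]
      exact List.mem_toFinset.mp hpf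
    · have hm2 : p.2 = (m : Int) := hpm.resolve_left hm1
      rw [if_neg hm1]
      refine ⟨Finset.mem_range.mpr (by omega), ?_, by omega⟩
      have : (min (m : Int) (p.1.toNat : Int), max (m : Int) (p.1.toNat : Int)) = p := by
        have hp1 : ((p.1.toNat : Int)) = p.1 := by omega
        rw [hp1]
        have h1 : min (m : Int) p.1 = p.1 := by omega
        have h2 : max (m : Int) p.1 = p.2 := by omega
        rw [h1, h2]
      rw [this]
      exact List.mem_toFinset.mp hpf
  · -- hj: backward map lands in the source
    intro j hj
    rw [Finset.mem_filter] at hj ⊢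
    obtain ⟨hjr, hjP, hjm⟩ := hj
    refine ⟨List.mem_toFinset.mpr hjP, ?_⟩
    by_cases h : m < j
    · left; simp; omega
    · right; simp; omega
  · -- left inverse
    intro p hp
    rw [Finset.mem_filter] at hp
    obtain ⟨hpf, hpm⟩ := hp
    have hpb := hPb p (List.mem_toFinset.mp hpf)
    by_cases hm1 : p.1 = (m : Int)
    · rw [if_pos hm1]
      have hp2 : ((p.2.toNat : Int)) = p.2 := by omega
      rw [hp2]
      have h1 : min (m : Int) p.2 = p.1 := by omega
      have h2 : max (m : Int) p.2 = p.2 := by omega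
      rw [h1, h2]
    · have hm2 : p.2 = (m : Int) := hpm.resolve_left hm1
      rw [if_neg hm1]
      have hp1 : ((p.1.toNat : Int)) = p.1 := by omega
      rw [hp1]
      have h1 : min (m : Int) p.1 = p.1 := by omega
      have h2 : max (m : Int) p.1 = p.2 := by omega
      rw [h1, h2]
  · -- right inverse
    intro j hj
    rw [Finset.mem_filter] at hj
    obtain ⟨hjr, hjP, hjm⟩ := hj
    by_cases h : m < j
    · have h1 : min (m : Int) (j : Int) = (m : Int) := by omega
      have h2 : max (m : Int) (j : Int) = (j : Int) := by omega
      rw [h1, h2]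
      simp
    · have h1 : min (m : Int) (j : Int) = (j : Int) := by omega
      have h2 : max (m : Int) (j : Int) = (m : Int) := by omega
      rw [h1, h2]
      have hne' : ¬ ((j : Int) = (m : Int)) := by omega
      simp [hne']
  · -- values agree
    intro p hp
    rw [Finset.mem_filter] at hp
    obtain ⟨hpf, hpm⟩ := hp
    have hpb := hPb p (List.mem_toFinset.mp hpf)
    by_cases hm1 : p.1 = (m : Int)
    · rw [if_pos hm1, if_pos hm1]
    · have hm2 : p.2 = (m : Int) := hpm.resolve_left hm1
      rw [if_neg hm1, if_pos hm2, if_neg hm1]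

-- score ranking + total deviation = number of beaten opponents
theorem pv_rank_plus_dev (gp : List (Int × Int)) (n m : Nat) :
    ((List.range n).countP (fun j => decide (pvS gp j < pvS gp m)) : Int)
      + ((List.range n).map (pvG gp m)).sum
      = ((List.range n).countP (fun j => decide (j ≠ m) && pvBt gp m j) : Int) := by
  rw [← PySem.List.sum_map_ite_one_zero, ← PySem.List.sum_map_ite_one_zero,
    ← PySem.List.sum_map_add_int]
  apply congrArg
  apply List.map_congr_left
  intro j hj
  by_cases hjm : j = m
  · subst hjm
    rw [pvG_self, pvBt_self]
    simp
  · unfold pvG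
    have h1 : (decide (j ≠ m) && pvBt gp m j) = pvBt gp m j := by simp [hjm]
    rw [h1]
    by_cases hb : pvBt gp m j <;> by_cases hs : pvS gp j < pvS gp m <;> simp [hb, hs]

-- ===== VERDICT (by name: the statement is the Claim_ definition above) =====
theorem solution_spec : Claim_equal_solution := by
  unfold Claim_equal_solution
  intro friends gifts _dom hpre
  unfold Spec_solution
  obtain ⟨hne, hlines0⟩ := hpre
  have hlines : ∀ line ∈ gifts, pvPreLine friends line :=
    fun l hl => ⟨(hlines0 l hl).1, (hlines0 l hl).2⟩
  have hbnd := pv_gp_bounds friends gifts hlines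
  set n := friends.length with hn
  set gp := pvGP friends gifts with hgp
  -- A's matrix entries are pair counts
  have hps_bnd : ∀ p ∈ pvPS friends gifts, p.1 < n ∧ p.2 < n := by
    intro p hp
    obtain ⟨q, hq, rfl⟩ := List.mem_map.mp (by exact hp)
    have := hbnd q hq
    constructor <;> simp <;> omega
  have hmat : ∀ i j, i < n → j < n →
      ((pvA_matrix n (pvA_dict friends) gifts).getD i []).getD j 0 = pvCnt gp i j := by
    intro i j hi hj
    rw [pvA_matrix_eq friends gifts n hlines]
    rw [pv_mfold_entry (pvPS friends gifts) _
      (by simpa using hps_bnd)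
      (fun k hk => by
        rw [List.length_replicate] at hk
        rw [List.getD_eq_getElem?_getD, List.getElem?_replicate, if_pos hk]
        simp)
      i j (by simpa using hi) (by simpa using hj)]
    have hcnt := pv_count_ps gp
      (fun p hp => ⟨(hbnd p hp).1.1, (hbnd p hp).2.1⟩) i j
    simp only [List.getD_replicate _ hi, List.getD_replicate _ hj]
    rw [← hcnt]
    unfold pvPS
    rw [← hgp]
    ring
  -- A's gift index is the score
  have hscoreA : ∀ i, i < n →
      (pvA_giftIdx n (pvA_matrix n (pvA_dict friends) gifts)).getD i 0 = pvS gp i := by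
    intro i hi
    rw [pvA_giftIdx_entry _ _ i hi]
    rw [List.map_congr_left (fun j hj => hmat i j hi (List.mem_range.mp hj)),
        List.map_congr_left (fun j hj => hmat j i (List.mem_range.mp hj) hi)]
    rw [pv_sum_cnt_fst gp n i (fun p hp => by have := (hbnd p hp).2; omega),
        pv_sum_cnt_snd gp n i (fun p hp => by have := (hbnd p hp).1; omega)]
    rfl
  -- B's state components
  have hstate := pvB_state_eq friends gifts n hlines
  rw [← hgp] at hstate
  have hcounts : ∀ i j : Nat,
      (pvB_state (pvB_idx friends) n gifts).1.getD ((i : Int), (j : Int)) 0 = pvCnt gp i j := by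
    intro i j
    rw [hstate]
    simp only
    rw [PySem.Dict.getD_foldl_insert_add_one]
    simp [pvCnt]
  have hgive : ∀ i, i < n →
      (pvB_state (pvB_idx friends) n gifts).2.1.getD i 0
        = (gp.countP (fun p => p.1 == (i : Int)) : Int) := by
    intro i hi
    rw [hstate]
    simp only
    rw [pv_vfold_entry _ _ i (by simpa using hi)]
    rw [List.getD_replicate _ hi, pv_count_fst gp (fun p hp => (hbnd p hp).1.1) i]
    ring
  have hget : ∀ i, i < n →
      (pvB_state (pvB_idx friends) n gifts).2.2.1.getD i 0
        = (gp.countP (fun p => p.2 == (i : Int)) : Int) := by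
    intro i hi
    rw [hstate]
    simp only
    rw [pv_vfold_entry _ _ i (by simpa using hi)]
    rw [List.getD_replicate _ hi, pv_count_snd gp (fun p hp => (hbnd p hp).2.1) i]
    ring
  have hpairs : (pvB_state (pvB_idx friends) n gifts).2.2.2.keys = pvP gp := by
    rw [hstate]
    exact pv_pairfold_keys gp
  set score := pvB_score (pvB_state (pvB_idx friends) n gifts).2.1
      (pvB_state (pvB_idx friends) n gifts).2.2.1 n with hscore
  have hscoreB : ∀ i, i < n → score.getD i 0 = pvS gp i := by
    intro i hi
    rw [hscore]
    unfold pvB_score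
    rw [PySem.List.getD_map_range _ _ _ _ hi, hgive i hi, hget i hi]
    rfl
  have hscorelen : score.length = n := by rw [hscore]; unfold pvB_score; simp
  -- B's base ranking: first[score[m]] counts the strictly smaller scores
  set order := PySem.List.sorted score (fun x => x) false with horder
  have hsorted : order.Pairwise (· ≤ ·) := PySem.List.sorted_pairwise score (fun x => x) ..
  have hbase : ∀ m, m < n →
      (pvB_base (pvB_first order) score n).getD m 0
        = ((List.range n).countP (fun j => decide (pvS gp j < pvS gp m)) : Int) := by
    intro m hm
    unfold pvB_base
    rw [PySem.List.getD_map_range _ _ _ _ hm]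
    unfold pvB_first
    rw [pv_first_fold order 0 PySem.Dict.empty (score.getD m 0)]
    rw [if_neg (by simp [PySem.Dict.contains_empty])]
    have hmem : score.getD m 0 ∈ order := by
      rw [horder, PySem.List.mem_sorted]
      rw [List.getD_eq_getElem _ 0 (by omega)]
      exact List.getElem_mem _
    obtain ⟨k, hk⟩ := Option.isSome_iff_exists.mp (pv_index_mem_isSome order _ hmem)
    rw [hk]
    have hcnt := pv_sorted_index_countP order (score.getD m 0) k hsorted hk
    have hperm : order.Perm score := PySem.List.sorted_perm score (fun x => x) false
    have hcnt2 : score.countP (fun y => decide (y < score.getD m 0)) = k := by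
      rw [← hperm.countP_eq]
      exact hcnt
    have hcnt3 : score.countP (fun y => decide (y < score.getD m 0))
        = (List.range n).countP (fun j => decide (pvS gp j < pvS gp m)) := by
      rw [hscoreB m hm, hscore]
      unfold pvB_score
      rw [List.countP_map]
      apply List.countP_congr
      intro j hj
      have hjn := List.mem_range.mp hj
      have hsj := hscoreB j hjn
      rw [hscore] at hsj
      unfold pvB_score at hsj
      rw [PySem.List.getD_map_range _ _ _ _ hjn] at hsj
      simp only [Function.comp_apply, decide_eq_true_eq]
      omega
    rw [← hcnt3, hcnt2]
    simp
  -- B's correction loop, reduced to the canonical fold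
  have hPbounds := pv_pvP_bounds gp n (fun p hp => hbnd p hp)
  have hbaselen : (pvB_base (pvB_first order) score n).length = n := by
    unfold pvB_base; simp
  have hcorrect : pvB_correct (pvB_state (pvB_idx friends) n gifts).1 score
        ((pvB_state (pvB_idx friends) n gifts).2.2.2.keys) (pvB_base (pvB_first order) score n)
      = (pvP gp).foldl (pvCStep gp) (pvB_base (pvB_first order) score n) := by
    rw [hpairs]
    unfold pvB_correct
    apply PySem.List.foldl_congr_mem
    intro w p hp
    have hpb := hPbounds p hp
    have hc1 : (pvB_state (pvB_idx friends) n gifts).1.getD (p.1, p.2) 0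
        = pvCnt gp p.1.toNat p.2.toNat := by
      have := hcounts p.1.toNat p.2.toNat
      rw [show ((p.1.toNat : Int), (p.2.toNat : Int)) = (p.1, p.2) from by
        rw [Prod.mk.injEq]; omega] at this
      exact this
    have hc2 : (pvB_state (pvB_idx friends) n gifts).1.getD (p.2, p.1) 0
        = pvCnt gp p.2.toNat p.1.toNat := by
      have := hcounts p.2.toNat p.1.toNat
      rw [show ((p.2.toNat : Int), (p.1.toNat : Int)) = (p.2, p.1) from by
        rw [Prod.mk.injEq]; omega] at this
      exact this
    have hs1 : score.getD p.1.toNat 0 = pvS gp p.1.toNat := hscoreB p.1.toNat (by omega)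
    have hs2 : score.getD p.2.toNat 0 = pvS gp p.2.toNat := hscoreB p.2.toNat (by omega)
    simp only [hc1, hc2, hs1, hs2, pvCStep]
    split_ifs <;> rfl
  -- both result lists agree entrywise
  have hwins_entry : ∀ m, m < n →
      ((pvP gp).foldl (pvCStep gp) (pvB_base (pvB_first order) score n)).getD m 0
        = ((List.range n).countP (fun j => decide (j ≠ m) && pvBt gp m j) : Int) := by
    intro m hm
    rw [pv_cfold_entry gp (pvP gp) _
      (by
        intro p hp
        have := hPbounds p hp
        rw [hbaselen]
        omega)
      m (by rw [hbaselen]; exact hm)]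
    rw [hbase m hm, pv_corr_sum gp n m hm (fun p hp => hbnd p hp)]
    exact pv_rank_plus_dev gp n m
  -- A's result list, reduced as before
  have hresult : pvA_result n (pvA_matrix n (pvA_dict friends) gifts)
        (pvA_giftIdx n (pvA_matrix n (pvA_dict friends) gifts))
      = (pvPairs n).foldl (pvPStep (pvBt gp)) (List.replicate n (0 : Int)) := by
    rw [pvA_result_eq]
    apply PySem.List.foldl_congr_mem
    intro acc p hp
    obtain ⟨h12, h2N⟩ := pv_pairs_mem n p hp
    have h1N : p.1 < n := by omega
    simp only [pvPStep]
    simp only [hmat p.1 p.2 h1N h2N, hmat p.2 p.1 h2N h1N, hscoreA p.1 h1N, hscoreA p.2 h2N]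
    rfl
  have hlists : pvA_result n (pvA_matrix n (pvA_dict friends) gifts)
        (pvA_giftIdx n (pvA_matrix n (pvA_dict friends) gifts))
      = pvB_correct (pvB_state (pvB_idx friends) n gifts).1 score
          ((pvB_state (pvB_idx friends) n gifts).2.2.2.keys) (pvB_base (pvB_first order) score n) := by
    rw [hresult, hcorrect]
    apply List.ext_getElem
    · rw [pv_pfold_len_list, pv_cfold_len, hbaselen, List.length_replicate]
    · intro m hm1 hm2
      have hmN : m < n := by
        rw [pv_pfold_len_list, List.length_replicate] at hm1; exact hm1
      have hL : ((pvPairs n).foldl (pvPStep (pvBt gp)) (List.replicate n (0 : Int))).getD m 0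
          = ((List.range n).countP (fun j => decide (j ≠ m) && pvBt gp m j) : Int) := by
        rw [pv_pfold_entry (pvBt gp) (pvPairs n) _
          (by
            intro p hp
            have := pv_pairs_mem n p hp
            rw [List.length_replicate]
            omega)
          m (by simpa using hmN)]
        rw [List.getD_replicate _ hmN,
          pv_countP_gain (pvBt gp) n m hmN (fun i j h => pvBt_asym gp i j h)]
        ring
      rw [← List.getD_eq_getElem _ 0 hm1, ← List.getD_eq_getElem _ 0 hm2, hL,
        hwins_entry m hmN]
  -- assemble
  show solution friends gifts = solution_alt friends gifts
  unfold solution solution_alt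
  simp only
  rw [← hn, ← hgp, ← hscore, ← horder] at *
  rw [hlists]
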